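-- pv_equiv track=rewrite | github.com/Jayhey/YOSO | YOSO_module.py | make_block_edge
-- ===== SOURCE A (Python) =====
-- def make_block_edge(edge_weight, S, B, M, N):
--     edge = [[[] for t in range(N)] for _ in range(M)]
--     for m in range(M):  # level마다
--         for i in range(N):  # operation마다
--             edge[m][i].append(edge_weight)
--             for _ in range(N):  # 남은 edge, node
--                 for j in range(m+1, M):
--                     edge[j][i].append(edge_weight)
--     return [[edge for _ in range(B)] for _ in range(S)]
-- ===== SOURCE B (Python) =====
-- def make_block_edge(edge_weight, S, B, M, N):
--     # Closed form: cell (j, i) receives one append at m == j plus N appends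
--     # from every earlier level m < j, hence exactly 1 + N*j copies.
--     edge = [[[edge_weight] * (1 + N * j) for i in range(N)] for j in range(M)]
--     return [[edge for _ in range(B)] for _ in range(S)]
-- ===== Notes on version B (the rewrite author's own statement) =====
-- stated objective: simpler
-- what changed: Replaces the triple-nested append loops with a closed-form per-cell length: each cell at level j is built directly as [edge_weight]*(1+N*j) instead of accumulating 1+N*j single appends.
import Mathlib
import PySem

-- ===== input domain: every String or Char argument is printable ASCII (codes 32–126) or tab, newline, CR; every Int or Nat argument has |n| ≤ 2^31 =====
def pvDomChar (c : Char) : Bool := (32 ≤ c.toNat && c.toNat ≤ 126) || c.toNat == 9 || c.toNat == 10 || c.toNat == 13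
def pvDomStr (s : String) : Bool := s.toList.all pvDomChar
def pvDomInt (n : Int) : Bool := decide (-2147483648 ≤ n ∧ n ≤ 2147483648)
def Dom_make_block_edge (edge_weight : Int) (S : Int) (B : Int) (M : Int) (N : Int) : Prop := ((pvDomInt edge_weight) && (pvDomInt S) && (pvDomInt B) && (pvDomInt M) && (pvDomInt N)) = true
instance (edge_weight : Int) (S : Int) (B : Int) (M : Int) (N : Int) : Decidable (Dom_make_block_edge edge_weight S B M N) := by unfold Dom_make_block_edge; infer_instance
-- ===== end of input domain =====

-- B replaces A's triple-nested append loops by the closed-form cell [w]*(1+N*j) (objective: simpler).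
-- Lean lists are values, so the equivalence proved here is about the RETURNED value
-- (B preserves A's Python-level aliasing of the shared `edge` object anyway).

-- ===== PORT A =====
-- edge[j][i].append(w); indices produced by range() are nonnegative, so .toNat is exact there.
def pvApp (w : Int) (j i : Nat) (e : List (List (List Int))) : List (List (List Int)) :=
  e.modify j (fun row => row.modify i (fun cell => cell ++ [w]))

def make_block_edge (edge_weight : Int) (S : Int) (B : Int) (M : Int) (N : Int) : List (List (List (List (List Int)))) :=
  let edge0 := (PySem.List.pyRange 0 M 1).map (fun _ => (PySem.List.pyRange 0 N 1).map (fun _t => ([] : List Int)))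
  let edge :=
    (PySem.List.pyRange 0 M 1).foldl (fun e m =>
      (PySem.List.pyRange 0 N 1).foldl (fun e i =>
        let e := pvApp edge_weight m.toNat i.toNat e
        (PySem.List.pyRange 0 N 1).foldl (fun e _ =>
          (PySem.List.pyRange (m+1) M 1).foldl (fun e j =>
            pvApp edge_weight j.toNat i.toNat e) e) e) e) edge0
  (PySem.List.pyRange 0 S 1).map (fun _ => (PySem.List.pyRange 0 B 1).map (fun _ => edge))

-- ===== PORT B =====
-- [edge_weight] * (1 + N*j): Python list repetition clamps a negative count to 0, exactly .toNat.
def make_block_edge_alt (edge_weight : Int) (S : Int) (B : Int) (M : Int) (N : Int) : List (List (List (List (List Int)))) :=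
  let edge := (PySem.List.pyRange 0 M 1).map (fun j =>
    (PySem.List.pyRange 0 N 1).map (fun _i => List.replicate (1 + N * j).toNat edge_weight))
  (PySem.List.pyRange 0 S 1).map (fun _ => (PySem.List.pyRange 0 B 1).map (fun _ => edge))

-- ===== PRECONDITION & SPEC =====
def Spec_make_block_edge (edge_weight : Int) (S : Int) (B : Int) (M : Int) (N : Int) (out : List (List (List (List (List Int))))) : Prop := out = make_block_edge_alt edge_weight S B M N
instance (edge_weight : Int) (S : Int) (B : Int) (M : Int) (N : Int) (out : List (List (List (List (List Int))))) : Decidable (Spec_make_block_edge edge_weight S B M N out) := by unfold Spec_make_block_edge; infer_instance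

-- ===== CLAIM (what is proved, stated in full; the proofs are below) =====
def Claim_equal_make_block_edge : Prop := ∀ (edge_weight : Int) (S : Int) (B : Int) (M : Int) (N : Int), Dom_make_block_edge edge_weight S B M N → Spec_make_block_edge edge_weight S B M N (make_block_edge edge_weight S B M N)

-- ===== LEMMAS AND PROOFS =====

-- The uniform grid whose cell (j,i) holds (c j i) copies of w.
def pvOfC (w : Int) (Mn Nn : Nat) (c : Nat → Nat → Nat) : List (List (List Int)) :=
  (List.range Mn).map (fun j => (List.range Nn).map (fun i => List.replicate (c j i) w))

def pvBump (j i : Nat) (c : Nat → Nat → Nat) : Nat → Nat → Nat :=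
  fun j' i' => if j' = j ∧ i' = i then c j' i' + 1 else c j' i'

-- count-level mirror of A's edge-building loop (same fold shape, pvApp replaced by pvBump)
def pvCntA (M N : Int) : Nat → Nat → Nat :=
  (PySem.List.pyRange 0 M 1).foldl (fun c m =>
    (PySem.List.pyRange 0 N 1).foldl (fun c i =>
      let c := pvBump m.toNat i.toNat c
      (PySem.List.pyRange 0 N 1).foldl (fun c _ =>
        (PySem.List.pyRange (m+1) M 1).foldl (fun c j =>
          pvBump j.toNat i.toNat c) c) c) c) (fun _ _ => 0)

theorem pvApp_ofC (w : Int) (Mn Nn : Nat) (c : Nat → Nat → Nat) (j i : Nat) :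
    pvApp w j i (pvOfC w Mn Nn c) = pvOfC w Mn Nn (pvBump j i c) := by
  unfold pvApp pvOfC pvBump
  apply List.ext_getElem
  · simp [List.length_modify]
  intro j' h1 h2
  simp only [List.length_modify, List.length_map, List.length_range] at h1
  rw [List.getElem_modify]
  simp only [List.getElem_map, List.getElem_range]
  by_cases hjj : j = j'
  · subst hjj
    rw [if_pos rfl]
    apply List.ext_getElem
    · simp [List.length_modify]
    intro i' g1 g2
    simp only [List.length_modify] at g1
    rw [List.getElem_modify]
    simp only [List.getElem_map, List.getElem_range, true_and]
    by_cases hii : i = i'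
    · subst hii
      simp [List.replicate_succ']
    · have : ¬ i' = i := fun h => hii (Eq.symm h)
      simp [hii, this]
  · simp only [if_neg hjj]
    apply List.map_congr_left
    intro i' _
    have : ¬ (j' = j ∧ i' = i) := by rintro ⟨h, _⟩; exact hjj h.symm
    simp [this]

-- generic simulation of a fold on grids by a fold on counts
theorem pvFoldl_sim {β : Type} (w : Int) (Mn Nn : Nat) (L : List β)
    (F : List (List (List Int)) → β → List (List (List Int)))
    (G : (Nat → Nat → Nat) → β → (Nat → Nat → Nat))
    (h : ∀ c x, x ∈ L → F (pvOfC w Mn Nn c) x = pvOfC w Mn Nn (G c x))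
    (c : Nat → Nat → Nat) :
    L.foldl F (pvOfC w Mn Nn c) = pvOfC w Mn Nn (L.foldl G c) := by
  induction L generalizing c with
  | nil => rfl
  | cons x xs ih =>
      simp only [List.foldl_cons]
      rw [h c x (by simp), ih]
      intro c' y hy; exact h c' y (List.mem_cons_of_mem _ hy)

-- A's edge value is the uniform grid of its bump counts.
theorem pv_edge_sim (w M N : Int) :
    (PySem.List.pyRange 0 M 1).foldl (fun e m =>
      (PySem.List.pyRange 0 N 1).foldl (fun e i =>
        let e := pvApp w m.toNat i.toNat e
        (PySem.List.pyRange 0 N 1).foldl (fun e _ =>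
          (PySem.List.pyRange (m+1) M 1).foldl (fun e j =>
            pvApp w j.toNat i.toNat e) e) e) e)
      ((PySem.List.pyRange 0 M 1).map (fun _ => (PySem.List.pyRange 0 N 1).map (fun _t => ([] : List Int))))
    = pvOfC w M.toNat N.toNat (pvCntA M N) := by
  have h0 : (PySem.List.pyRange 0 M 1).map (fun _ => (PySem.List.pyRange 0 N 1).map (fun _t => ([] : List Int)))
      = pvOfC w M.toNat N.toNat (fun _ _ => 0) := by
    simp [pvOfC, PySem.List.pyRange_one, List.map_map, Function.comp_def, List.map_const']
  rw [h0]
  refine (pvFoldl_sim w M.toNat N.toNat _ _ (fun c (m : Int) =>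
    (PySem.List.pyRange 0 N 1).foldl (fun c i =>
      let c := pvBump m.toNat i.toNat c
      (PySem.List.pyRange 0 N 1).foldl (fun c _ =>
        (PySem.List.pyRange (m+1) M 1).foldl (fun c j =>
          pvBump j.toNat i.toNat c) c) c) c) ?_ _)
  intro c m _
  refine (pvFoldl_sim w M.toNat N.toNat _ _ (fun c (i : Int) =>
    let c := pvBump m.toNat i.toNat c
    (PySem.List.pyRange 0 N 1).foldl (fun c _ =>
      (PySem.List.pyRange (m+1) M 1).foldl (fun c j =>
        pvBump j.toNat i.toNat c) c) c) ?_ c)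
  intro c i _
  show (PySem.List.pyRange 0 N 1).foldl _ (pvApp w m.toNat i.toNat (pvOfC w M.toNat N.toNat c)) = _
  rw [pvApp_ofC]
  refine (pvFoldl_sim w M.toNat N.toNat _ _ (fun c _ =>
    (PySem.List.pyRange (m+1) M 1).foldl (fun c j =>
      pvBump j.toNat i.toNat c) c) ?_ _)
  intro c _ _
  refine (pvFoldl_sim w M.toNat N.toNat _ _ (fun c (j : Int) =>
    pvBump j.toNat i.toNat c) ?_ c)
  intro c j _
  exact pvApp_ofC w M.toNat N.toNat c j.toNat i.toNat

-- pointwise evaluation of a count fold whose steps add a fixed per-element amount at (j,i)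
theorem pvFoldl_add_pt {β : Type} (L : List β)
    (f : (Nat → Nat → Nat) → β → (Nat → Nat → Nat)) (j i : Nat) (δ : β → Nat)
    (hf : ∀ c x, x ∈ L → f c x j i = c j i + δ x) (c : Nat → Nat → Nat) :
    (L.foldl f c) j i = c j i + (L.map δ).sum := by
  induction L generalizing c with
  | nil => simp
  | cons x xs ih =>
      simp only [List.foldl_cons, List.map_cons, List.sum_cons]
      rw [ih (fun c y hy => hf c y (List.mem_cons_of_mem _ hy)) (f c x),
          hf c x (by simp)]
      omega

theorem pvSum_eq (n i d : Nat) :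
    ((List.range n).map (fun k => if i = k then d else 0)).sum = if i < n then d else 0 := by
  induction n with
  | zero => simp
  | succ n ih =>
      rw [List.range_succ, List.map_append, List.sum_append, ih]
      simp only [List.map_cons, List.map_nil, List.sum_cons, List.sum_nil]
      split_ifs <;> omega

theorem pvSum_shift (n a j : Nat) :
    ((List.range n).map (fun k => if j = a + k then 1 else 0)).sum
      = if a ≤ j ∧ j < a + n then 1 else 0 := by
  induction n with
  | zero => simp
  | succ n ih =>
      rw [List.range_succ, List.map_append, List.sum_append, ih]
      simp only [List.map_cons, List.map_nil, List.sum_cons, List.sum_nil]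
      split_ifs <;> omega

theorem pvSum_lt (n j Nn : Nat) :
    n ≤ j → ((List.range n).map (fun m => (if j = m then 1 else 0) + (if m < j then Nn else 0))).sum
      = Nn * n := by
  induction n with
  | zero => intro _; simp
  | succ n ih =>
      intro h
      rw [List.range_succ, List.map_append, List.sum_append, ih (by omega)]
      have h1 : ¬ j = n := by omega
      have h2 : n < j := by omega
      simp [h1, h2, Nat.mul_succ]

theorem pvSum_main (n j Nn : Nat) :
    j < n → ((List.range n).map (fun m => (if j = m then 1 else 0) + (if m < j then Nn else 0))).sum
      = 1 + Nn * j := by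
  induction n with
  | zero => omega
  | succ n ih =>
      intro h
      rw [List.range_succ, List.map_append, List.sum_append]
      simp only [List.map_cons, List.map_nil, List.sum_cons, List.sum_nil]
      by_cases hj : j < n
      · rw [ih hj]
        have h1 : ¬ j = n := by omega
        have h2 : ¬ n < j := by omega
        simp [h1, h2]
      · have hjn : j = n := by omega
        rw [hjn, pvSum_lt n n Nn (le_refl _)]
        simp
        omega

-- the count of A's appends at a cell (j,i) inside the grid is 1 + N*j
theorem pvCntA_eval (M N : Int) (j i : Nat) (hj : j < M.toNat) (hi : i < N.toNat) :
    pvCntA M N j i = 1 + N.toNat * j := by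
  unfold pvCntA
  simp only [PySem.List.pyRange_one, List.foldl_map, zero_add, sub_zero, Int.toNat_natCast]
  -- innermost j-loop: adds 1 at column i0 of every level m+1..M-1
  have hJ : ∀ (m i0 : Nat) (c : Nat → Nat → Nat), m < M.toNat →
      (List.foldl (fun x (k : Nat) => pvBump ((m:Int) + 1 + (k:Int)).toNat i0 x) c
        (List.range (M - ((m:Int) + 1)).toNat)) j i
      = c j i + (if i = i0 ∧ m + 1 ≤ j then 1 else 0) := by
    intro m i0 c hm
    rw [pvFoldl_add_pt _ _ j i (fun k => if j = m + 1 + k ∧ i = i0 then 1 else 0)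
      (by
        intro c k _
        have hk : ((m:Int) + 1 + (k:Int)).toNat = m + 1 + k := by omega
        rw [hk]; simp only [pvBump]; split_ifs <;> omega) c]
    congr 1
    by_cases hio : i = i0
    · subst hio
      simp only [and_true]
      rw [pvSum_shift ((M - ((m:Int) + 1)).toNat) (m + 1) j]
      have hiff : (m + 1 ≤ j ∧ j < m + 1 + (M - ((m:Int) + 1)).toNat) ↔ (m + 1 ≤ j) := by omega
      rw [if_congr hiff rfl rfl]
      simp
    · simp [hio]
  -- the repeat-N loop multiplies that by N
  have hN : ∀ (m i0 : Nat) (c : Nat → Nat → Nat), m < M.toNat →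
      (List.foldl (fun x (_ : Nat) =>
          List.foldl (fun x (k : Nat) => pvBump ((m:Int) + 1 + (k:Int)).toNat i0 x) x
            (List.range (M - ((m:Int) + 1)).toNat)) c (List.range N.toNat)) j i
      = c j i + N.toNat * (if i = i0 ∧ m + 1 ≤ j then 1 else 0) := by
    intro m i0 c hm
    rw [pvFoldl_add_pt _ _ j i (fun _ => if i = i0 ∧ m + 1 ≤ j then 1 else 0)
      (fun c k _ => hJ m i0 c hm) c]
    rw [List.map_const', List.sum_replicate, smul_eq_mul, List.length_range]
  -- one iteration of the i-loop at column i0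
  have hI : ∀ (m : Nat) (c : Nat → Nat → Nat), m < M.toNat →
      (List.foldl (fun x (i0 : Nat) =>
          List.foldl (fun x (_ : Nat) =>
            List.foldl (fun x (k : Nat) => pvBump ((m:Int) + 1 + (k:Int)).toNat i0 x) x
              (List.range (M - ((m:Int) + 1)).toNat)) (pvBump m i0 x) (List.range N.toNat))
        c (List.range N.toNat)) j i
      = c j i + ((if j = m then 1 else 0) + (if m < j then N.toNat else 0)) := by
    intro m c hm
    rw [pvFoldl_add_pt _ _ j i
      (fun i0 => if i = i0 then (if j = m then 1 else 0) + (if m < j then N.toNat else 0) else 0)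
      (by
        intro c i0 _
        rw [hN m i0 (pvBump m i0 c) hm]
        unfold pvBump
        by_cases h1 : i = i0 <;> by_cases h2 : j = m <;> by_cases h3 : m + 1 ≤ j <;>
          simp [h1, h2, h3] <;> omega) c]
    rw [pvSum_eq, if_pos hi]
  rw [pvFoldl_add_pt _ _ j i
    (fun m => (if j = m then 1 else 0) + (if m < j then N.toNat else 0))
    (fun c m hm => hI m c (List.mem_range.mp hm)) (fun _ _ => 0),
    pvSum_main M.toNat j N.toNat hj]
  omega

theorem pv_edge_eq (w M N : Int) :
    (PySem.List.pyRange 0 M 1).foldl (fun e m =>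
      (PySem.List.pyRange 0 N 1).foldl (fun e i =>
        let e := pvApp w m.toNat i.toNat e
        (PySem.List.pyRange 0 N 1).foldl (fun e _ =>
          (PySem.List.pyRange (m+1) M 1).foldl (fun e j =>
            pvApp w j.toNat i.toNat e) e) e) e)
      ((PySem.List.pyRange 0 M 1).map (fun _ => (PySem.List.pyRange 0 N 1).map (fun _t => ([] : List Int))))
    = (PySem.List.pyRange 0 M 1).map (fun j =>
        (PySem.List.pyRange 0 N 1).map (fun _i => List.replicate (1 + N * j).toNat w)) := by
  rw [pv_edge_sim]
  have hR : (PySem.List.pyRange 0 M 1).map (fun j =>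
        (PySem.List.pyRange 0 N 1).map (fun _i => List.replicate (1 + N * j).toNat w))
      = (List.range M.toNat).map (fun (jn : Nat) =>
          (List.range N.toNat).map (fun _ => List.replicate (1 + N * (jn : Int)).toNat w)) := by
    rw [PySem.List.pyRange_one 0 M, List.map_map]
    simp only [sub_zero]
    apply List.map_congr_left
    intro jn _
    simp only [Function.comp_apply, zero_add]
    rw [PySem.List.pyRange_one 0 N, List.map_map]
    simp [Function.comp_def]
  rw [hR]
  unfold pvOfC
  apply List.map_congr_left
  intro j hj
  apply List.map_congr_left
  intro i hi
  rw [pvCntA_eval M N j i (List.mem_range.mp hj) (List.mem_range.mp hi)]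
  have hN : (0:Int) < N := by
    have := List.mem_range.mp hi
    omega
  have h1 : (1 + N * (j : Int)) = ((1 + N.toNat * j : Nat) : Int) := by
    push_cast [Int.toNat_of_nonneg hN.le]
    ring
  rw [h1, Int.toNat_natCast]

-- ===== VERDICT (by name: the statement is the Claim_ definition above) =====
theorem make_block_edge_spec : Claim_equal_make_block_edge := by
  intro w S B M N _
  unfold Spec_make_block_edge
  simp only [make_block_edge, make_block_edge_alt]
  rw [pv_edge_eq]
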